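-- pv_equiv track=rewrite | github.com/psi-oss/get-physics-done | scripts/build_bug_campaign_artifacts.py | split_claims
-- ===== SOURCE A (Python) =====
-- def split_claims(excerpt: object) -> tuple[str, ...]:
--     if not isinstance(excerpt, str) or not excerpt.strip():
--         return ("unknown",)
--     claims: list[str] = []
--     current: list[str] = []
--     for line in excerpt.splitlines():
--         stripped = line.strip()
--         if stripped.startswith(("- ", "* ")):
--             if current:
--                 claims.append("\n".join(current).strip())
--             current = [stripped[2:].strip()]
--             continue
--         if current and stripped:
--             current.append(stripped)
--     if current:
--         claims.append("\n".join(current).strip())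
--     return tuple(claim for claim in claims if claim) or (excerpt.strip(),)
-- ===== SOURCE B (Python) =====
-- def _is_bullet(s):
--     return s.startswith(("- ", "* "))
--
--
-- def _groups(lines):
--     # lines is [] or begins with a bullet line
--     if not lines:
--         return []
--     i = 1
--     while i < len(lines) and not _is_bullet(lines[i]):
--         i += 1
--     body = [s for s in lines[1:i] if s]
--     claim = "\n".join([lines[0][2:].strip()] + body).strip()
--     return [claim] + _groups(lines[i:])
--
--
-- def split_claims(excerpt: object) -> tuple[str, ...]:
--     if not isinstance(excerpt, str) or not excerpt.strip():
--         return ("unknown",)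
--     lines = [line.strip() for line in excerpt.splitlines()]
--     while lines and not _is_bullet(lines[0]):
--         lines = lines[1:]
--     return tuple(c for c in _groups(lines) if c) or (excerpt.strip(),)
-- ===== Notes on version B (the rewrite author's own statement) =====
-- stated objective: alternative
-- what changed: Replaces A's single-pass flush-accumulator loop (claims/current state mutated line by line) with a drop-to-first-bullet step followed by a recursive grouping that builds each claim from the whole segment between consecutive bullet lines.
import Mathlib
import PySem

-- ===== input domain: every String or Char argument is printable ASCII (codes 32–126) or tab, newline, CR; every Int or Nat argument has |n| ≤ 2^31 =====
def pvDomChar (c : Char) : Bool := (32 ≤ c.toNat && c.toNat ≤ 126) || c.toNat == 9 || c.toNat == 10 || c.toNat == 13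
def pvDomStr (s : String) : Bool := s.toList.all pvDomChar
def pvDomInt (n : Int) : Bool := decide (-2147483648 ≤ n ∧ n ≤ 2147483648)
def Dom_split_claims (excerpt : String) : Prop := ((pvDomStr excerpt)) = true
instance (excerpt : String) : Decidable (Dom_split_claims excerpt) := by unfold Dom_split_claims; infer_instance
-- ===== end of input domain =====

-- B replaces A's running flush-accumulator with a drop-to-first-bullet step plus a
-- recursive grouping (takeWhile/dropWhile segments per bullet); objective: alternative decomposition, same cost.

-- stripped.startswith(("- ", "* ")) — the bullet test both Pythons perform
def pvIsBullet (s : List Char) : Bool :=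
  PySem.Chars.startswith s ['-', ' '] || PySem.Chars.startswith s ['*', ' ']

-- "\n".join(parts).strip() — identical expression in both Pythons
def pvJoinStrip (parts : List (List Char)) : List Char :=
  PySem.Chars.strip (PySem.Chars.join ['\n'] parts)

-- ===== PORT A =====
-- A's for-loop over splitlines with state (claims, current); the trailing flush is the [] case.
def pvLoopA : List (List Char) → List (List Char) → List (List Char) → List (List Char)
  | [], claims, current =>
      if current.isEmpty then claims else claims ++ [pvJoinStrip current]
  | line :: rest, claims, current =>
      let stripped := PySem.Chars.strip line
      if pvIsBullet stripped then
        pvLoopA rest (if current.isEmpty then claims else claims ++ [pvJoinStrip current])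
          [PySem.Chars.strip (PySem.List.slice stripped (some 2) none)]
      else if !current.isEmpty && !stripped.isEmpty then
        pvLoopA rest claims (current ++ [stripped])
      else
        pvLoopA rest claims current

def split_claims (excerpt : String) : List String :=
  let ecs := excerpt.toList
  if (PySem.Chars.strip ecs).isEmpty then ["unknown"]
  else
    let claims := pvLoopA (PySem.Chars.splitlines ecs) [] []
    let res := claims.filter (fun c => !c.isEmpty)
    (if res.isEmpty then [PySem.Chars.strip ecs] else res).map (fun cs => String.ofList cs)

-- ===== PORT B =====
-- _groups(lines): lines is [] or begins with a bullet; each claim is built from the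
-- segment up to the next bullet (Source B's index scan = takeWhile/dropWhile).
def pvGroups : List (List Char) → List (List Char)
  | [] => []
  | head :: tl =>
      let body := (tl.takeWhile (fun s => !pvIsBullet s)).filter (fun s => !s.isEmpty)
      pvJoinStrip (PySem.Chars.strip (PySem.List.slice head (some 2) none) :: body)
        :: pvGroups (tl.dropWhile (fun s => !pvIsBullet s))
termination_by lines => lines.length
decreasing_by
  exact Nat.lt_succ_of_le (List.length_dropWhile_le _ _)

def split_claims_alt (excerpt : String) : List String :=
  let ecs := excerpt.toList
  if (PySem.Chars.strip ecs).isEmpty then ["unknown"]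
  else
    let lines := (PySem.Chars.splitlines ecs).map PySem.Chars.strip
    let start := lines.dropWhile (fun s => !pvIsBullet s)
    let res := (pvGroups start).filter (fun c => !c.isEmpty)
    (if res.isEmpty then [PySem.Chars.strip ecs] else res).map (fun cs => String.ofList cs)

-- ===== PRECONDITION & SPEC =====
def Spec_split_claims (excerpt : String) (out : List String) : Prop := out = split_claims_alt excerpt
instance (excerpt : String) (out : List String) : Decidable (Spec_split_claims excerpt out) := by unfold Spec_split_claims; infer_instance

-- ===== CLAIM (what is proved, stated in full; the proofs are below) =====
def Claim_equal_split_claims : Prop := ∀ (excerpt : String), Dom_split_claims excerpt → Spec_split_claims excerpt (split_claims excerpt)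

-- ===== LEMMAS AND PROOFS =====

-- A's loop with a nonempty current equals: one claim from current plus the pending
-- non-bullet continuation lines, then B's groups of the rest.
theorem pvLoopA_nonempty (lines : List (List Char)) :
    ∀ (claims cur : List (List Char)), cur ≠ [] →
    pvLoopA lines claims cur =
      claims ++ pvJoinStrip (cur ++
          ((lines.map PySem.Chars.strip).takeWhile (fun s => !pvIsBullet s)).filter
            (fun s => !s.isEmpty))
        :: pvGroups ((lines.map PySem.Chars.strip).dropWhile (fun s => !pvIsBullet s)) := by
  induction lines with
  | nil =>
      intro claims cur h
      simp [pvLoopA, List.isEmpty_iff, h, pvGroups]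
  | cons line rest ih =>
      intro claims cur h
      by_cases hb : pvIsBullet (PySem.Chars.strip line) = true
      · simp only [pvLoopA, hb, if_true, List.isEmpty_iff, h, List.map_cons]
        rw [ih _ _ (by simp)]
        simp [hb, pvGroups]
      · by_cases hs : (PySem.Chars.strip line).isEmpty = true
        · have hs' : PySem.Chars.strip line = [] := by simpa [List.isEmpty_iff] using hs
          simp only [pvLoopA, hb, Bool.false_eq_true, if_false, hs, Bool.not_true,
            Bool.and_false, List.map_cons]
          rw [ih _ _ h]
          simp [hs', show pvIsBullet [] = false by decide]
        · simp only [pvLoopA, hb, Bool.false_eq_true, if_false, List.map_cons]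
          have hcur : (cur.isEmpty) = false := by simp [h]
          simp only [hcur, Bool.not_false, Bool.not_eq_true] at hs ⊢
          simp only [hs, Bool.not_false, Bool.true_and, if_true]
          rw [ih _ _ (by simp)]
          simp [hb, hs]
  
-- A's loop with empty current equals B's groups of the stripped lines from the first bullet on.
theorem pvLoopA_empty (lines : List (List Char)) :
    ∀ (claims : List (List Char)),
    pvLoopA lines claims [] =
      claims ++ pvGroups ((lines.map PySem.Chars.strip).dropWhile (fun s => !pvIsBullet s)) := by
  induction lines with
  | nil => intro claims; simp [pvLoopA, pvGroups]
  | cons line rest ih =>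
      intro claims
      by_cases hb : pvIsBullet (PySem.Chars.strip line) = true
      · simp only [pvLoopA, hb, if_true, List.isEmpty_nil, List.map_cons]
        rw [pvLoopA_nonempty _ _ _ (by simp)]
        simp [hb, pvGroups]
      · simp only [pvLoopA, hb, Bool.false_eq_true, if_false, List.isEmpty_nil,
          Bool.not_true, Bool.false_and, List.map_cons]
        rw [ih]
        simp [hb]

-- ===== VERDICT (by name: the statement is the Claim_ definition above) =====
theorem split_claims_spec : Claim_equal_split_claims := by
  intro excerpt _
  unfold Spec_split_claims split_claims split_claims_alt
  by_cases h : (PySem.Chars.strip excerpt.toList).isEmpty = true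
  · simp [h]
  · simp only [h, Bool.false_eq_true, if_false]
    rw [pvLoopA_empty]
    simp
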